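-- pv_equiv track=rewrite | github.com/fmatyas00/jedlikprojektek | taj-szam/main.py | szorzatok_osszege
-- ===== SOURCE A (Python) =====
-- def szorzatok_osszege(taj: list[int]) -> int:
--     szorzatosszeg: int = 0
--     for i in range(len(taj) - 1):
--         if (i + 1) % 2 == 0:
--             szorzatosszeg += taj[i] * 7
--         else:
--             szorzatosszeg += taj[i] * 3
--     return szorzatosszeg
-- ===== SOURCE B (Python) =====
-- def szorzatok_osszege(taj: list[int]) -> int:
--     body = taj[:-1]
--     n = len(body)
--     total = 0
--     i = 0
--     while i + 1 < n:
--         total += 3 * body[i] + 7 * body[i + 1]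
--         i += 2
--     if i < n:
--         total += 3 * body[i]
--     return total
-- ===== Notes on version B (the rewrite author's own statement) =====
-- stated objective: alternative
-- what changed: Replaces A's per-index loop with a parity branch choosing weight 7 or 3 by a stride-2 pairwise loop over taj[:-1] that adds 3*body[i] + 7*body[i+1] per pair (plus a trailing 3*body[i] for an odd-length body), eliminating the parity test entirely.
import Mathlib
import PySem

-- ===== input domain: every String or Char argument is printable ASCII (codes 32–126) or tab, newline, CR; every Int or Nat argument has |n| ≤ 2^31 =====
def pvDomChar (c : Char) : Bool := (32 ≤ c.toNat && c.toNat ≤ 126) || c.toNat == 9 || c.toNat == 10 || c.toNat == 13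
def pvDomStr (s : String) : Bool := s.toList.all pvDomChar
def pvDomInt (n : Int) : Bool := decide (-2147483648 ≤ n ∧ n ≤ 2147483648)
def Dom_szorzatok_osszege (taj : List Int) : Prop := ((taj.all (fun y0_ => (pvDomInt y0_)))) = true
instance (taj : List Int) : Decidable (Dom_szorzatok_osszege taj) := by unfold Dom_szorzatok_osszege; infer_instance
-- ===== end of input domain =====

-- B replaces A's per-index loop with its parity branch (weight 7 vs 3) by a stride-2
-- pairwise walk over taj[:-1] adding 3*body[i] + 7*body[i+1] per pair, plus a trailing
-- 3*body[i] for an odd-length body; a different decomposition of the same O(n) cost.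
-- ===== PORT A =====
def szorzatok_osszege (taj : List Int) : Int :=
  (PySem.List.pyRange 0 ((taj.length : Int) - 1) 1).foldl
    (fun szorzatosszeg i =>
      if PySem.Int.mod (i + 1) 2 == 0 then
        szorzatosszeg + PySem.List.pyGetD taj i 0 * 7
      else
        szorzatosszeg + PySem.List.pyGetD taj i 0 * 3) 0

-- ===== PORT B =====
-- the while loop of Source B: i advances by 2 while i+1 < n; indexing is exact since
-- i and i+1 are always in range when read (pyGetD's default is never used)
def goB (body : List Int) (i : Nat) (total : Int) : Int :=
  if i + 1 < body.length then
    goB body (i + 2)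
      (total + 3 * PySem.List.pyGetD body (i : Int) 0
             + 7 * PySem.List.pyGetD body ((i : Int) + 1) 0)
  else if i < body.length then
    total + 3 * PySem.List.pyGetD body (i : Int) 0
  else total
termination_by body.length - i

def szorzatok_osszege_alt (taj : List Int) : Int :=
  goB (PySem.List.slice taj none (some (-1))) 0 0

-- ===== PRECONDITION & SPEC =====
def Spec_szorzatok_osszege (taj : List Int) (out : Int) : Prop := out = szorzatok_osszege_alt taj
instance (taj : List Int) (out : Int) : Decidable (Spec_szorzatok_osszege taj out) := by unfold Spec_szorzatok_osszege; infer_instance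

-- ===== CLAIM (what is proved, stated in full; the proofs are below) =====
def Claim_equal_szorzatok_osszege : Prop := ∀ (taj : List Int), Dom_szorzatok_osszege taj → Spec_szorzatok_osszege taj (szorzatok_osszege taj)

-- ===== LEMMAS AND PROOFS =====

-- the weight function A applies to an (index, element) pair
def wA (p : Int × Int) : Int :=
  if PySem.Int.mod (p.1 + 1) 2 == 0 then p.2 * 7 else p.2 * 3

-- A's fold on ys ++ [z] equals the weighted sum over enumerate ys 0
lemma szorzatok_concat (ys : List Int) (z : Int) :
    szorzatok_osszege (ys ++ [z]) = ((PySem.List.enumerate ys 0).map wA).sum := by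
  unfold szorzatok_osszege
  have hlen : ((ys ++ [z]).length : Int) - 1 = (ys.length : Int) := by
    push_cast [List.length_append, List.length_singleton]; ring
  rw [hlen]
  have hf : (fun (szorzatosszeg i : Int) =>
      if PySem.Int.mod (i + 1) 2 == 0 then
        szorzatosszeg + PySem.List.pyGetD (ys ++ [z]) i 0 * 7
      else
        szorzatosszeg + PySem.List.pyGetD (ys ++ [z]) i 0 * 3)
      = (fun acc i => acc + wA (i, PySem.List.pyGetD (ys ++ [z]) i 0)) := by
    funext acc i
    simp only [wA]
    split_ifs <;> rfl
  have hmap : (PySem.List.pyRange 0 (ys.length : Int) 1).map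
        (fun i => wA (i, PySem.List.pyGetD (ys ++ [z]) i 0))
      = (PySem.List.pyRange 0 (ys.length : Int) 1).map
        (fun i => wA (i, PySem.List.pyGetD ys i 0)) := by
    apply List.map_congr_left
    intro i hi
    have hmem := (PySem.List.mem_pyRange_one).mp hi
    have h0 : 0 ≤ i := hmem.1
    have h1 : i < (ys.length : Int) := hmem.2
    have hget : PySem.List.pyGetD (ys ++ [z]) i 0 = PySem.List.pyGetD ys i 0 := by
      rw [PySem.List.pyGetD_eq_getElem (ys ++ [z]) 0 h0 (by simp; omega),
          PySem.List.pyGetD_eq_getElem ys 0 h0 (by simpa using h1)]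
      exact List.getElem_append_left _
    rw [hget]
  rw [hf, PySem.List.foldl_add, hmap,
    PySem.List.enumerate_eq_map_pyRange (d := 0), List.map_map]
  simp only [Function.comp_def, zero_add, PySem.List.len]

-- B's pairwise walk from an even index i computes the wA-weighted sum of the suffix
lemma goB_eq_aux (ys : List Int) : ∀ (k i : Nat) (total : Int), ys.length - i ≤ k → i % 2 = 0 →
    goB ys i total = total + ((PySem.List.enumerate (ys.drop i) (i : Int)).map wA).sum := by
  intro k
  induction k with
  | zero =>
    intro i total hk hev
    have hge : ys.length ≤ i := by omega
    rw [goB, if_neg (by omega), if_neg (by omega),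
      List.drop_eq_nil_of_le hge, PySem.List.enumerate_nil]
    simp
  | succ k ih =>
    intro i total hk hev
    rw [goB]
    by_cases h1 : i + 1 < ys.length
    · have hi : i < ys.length := by omega
      have hdrop : ys.drop i = ys[i] :: ys[i+1] :: ys.drop (i + 2) := by
        rw [List.drop_eq_getElem_cons hi, List.drop_eq_getElem_cons h1]
      have hg0 : PySem.List.pyGetD ys (i : Int) 0 = ys[i] := by
        rw [PySem.List.pyGetD_eq_getElem ys 0 (by positivity) (by exact_mod_cast hi)]; simp
      have hg1 : PySem.List.pyGetD ys ((i : Int) + 1) 0 = ys[i+1] := by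
        have : ((i : Int) + 1) = ((i + 1 : Nat) : Int) := by push_cast; ring
        rw [this, PySem.List.pyGetD_eq_getElem ys 0 (by positivity) (by exact_mod_cast h1)]
        simp
      have hw0 : wA ((i : Int), ys[i]) = 3 * ys[i] := by
        simp only [wA, PySem.Int.mod, Int.fmod_eq_emod]
        have : ((i : Int) + 1) % 2 = 1 := by omega
        rw [this]; norm_num; ring
      have hw1 : wA ((i : Int) + 1, ys[i+1]) = 7 * ys[i+1] := by
        simp only [wA, PySem.Int.mod, Int.fmod_eq_emod]
        have : ((i : Int) + 1 + 1) % 2 = 0 := by omega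
        rw [this]; norm_num; ring
      rw [if_pos h1, ih (i + 2) _ (by omega) (by omega), hdrop,
        PySem.List.enumerate_cons, PySem.List.enumerate_cons]
      simp only [List.map_cons, List.sum_cons, hg0, hg1, hw0, hw1]
      have : ((i + 2 : Nat) : Int) = (i : Int) + 1 + 1 := by push_cast; ring
      rw [this]; ring
    · rw [if_neg h1]
      by_cases h2 : i < ys.length
      · have hdrop : ys.drop i = [ys[i]] := by
          rw [List.drop_eq_getElem_cons h2]
          have : ys.drop (i + 1) = [] := List.drop_eq_nil_of_le (by omega)
          rw [this]
        have hg0 : PySem.List.pyGetD ys (i : Int) 0 = ys[i] := by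
          rw [PySem.List.pyGetD_eq_getElem ys 0 (by positivity) (by exact_mod_cast h2)]
          simp
        have hw0 : wA ((i : Int), ys[i]) = 3 * ys[i] := by
          simp only [wA, PySem.Int.mod, Int.fmod_eq_emod]
          have : ((i : Int) + 1) % 2 = 1 := by omega
          rw [this]; norm_num; ring
        rw [if_pos h2, hdrop, PySem.List.enumerate_cons, PySem.List.enumerate_nil]
        simp only [List.map_cons, List.map_nil, List.sum_cons, List.sum_nil, hg0, hw0]
        ring
      · have hdrop : ys.drop i = [] := List.drop_eq_nil_of_le (by omega)
        rw [if_neg h2, hdrop, PySem.List.enumerate_nil]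
        simp

lemma goB_eq (ys : List Int) (i : Nat) (total : Int) (hev : i % 2 = 0) :
    goB ys i total = total + ((PySem.List.enumerate (ys.drop i) (i : Int)).map wA).sum :=
  goB_eq_aux ys ys.length i total (by omega) hev

-- ===== VERDICT (by name: the statement is the Claim_ definition above) =====
theorem szorzatok_osszege_spec : Claim_equal_szorzatok_osszege := by
  intro taj _
  show szorzatok_osszege taj = szorzatok_osszege_alt taj
  rcases List.eq_nil_or_concat taj with rfl | ⟨ys, z, rfl⟩
  · unfold szorzatok_osszege szorzatok_osszege_alt
    rw [PySem.List.pyRange_one_eq_nil (by simp), PySem.List.slice_to_neg_one,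
      List.dropLast_nil, goB_eq [] 0 0 rfl]
    simp [PySem.List.enumerate_nil]
  · rw [List.concat_eq_append, szorzatok_concat]
    unfold szorzatok_osszege_alt
    rw [PySem.List.slice_to_neg_one, List.dropLast_concat,
      goB_eq ys 0 0 rfl, List.drop_zero, zero_add, Nat.cast_zero]
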